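-- pv_equiv track=rewrite | github.com/Fluchw/subtitle_detector | core/utils.py | _union_box
-- ===== SOURCE A (Python) =====
-- def _union_box(box1: list, box2: list) -> list:
--     """
--     计算两个框的并集（最小外接矩形）
--
--     Args:
--         box1: 第一个框的四个顶点
--         box2: 第二个框的四个顶点
--
--     Returns:
--         包含两个框的最小外接矩形（四个顶点）
--     """
--     # 获取所有顶点的坐标
--     all_xs = [p[0] for p in box1] + [p[0] for p in box2]
--     all_ys = [p[1] for p in box1] + [p[1] for p in box2]
--
--     # 计算最小外接矩形
--     min_x, max_x = min(all_xs), max(all_xs)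
--     min_y, max_y = min(all_ys), max(all_ys)
--
--     # 返回四个顶点（左上、右上、右下、左下）
--     return [
--         [min_x, min_y],
--         [max_x, min_y],
--         [max_x, max_y],
--         [min_x, max_y]
--     ]
-- ===== SOURCE B (Python) =====
-- def _bbox(pts):
--     # bounding rectangle (min_x, max_x, min_y, max_y) by divide and conquer:
--     # a single point is its own rectangle; otherwise merge the rectangles of the two halves.
--     if len(pts) <= 1:
--         p = pts[0]
--         return p[0], p[0], p[1], p[1]
--     mid = len(pts) // 2
--     a = _bbox(pts[:mid])
--     b = _bbox(pts[mid:])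
--     return (min(a[0], b[0]), max(a[1], b[1]), min(a[2], b[2]), max(a[3], b[3]))
--
--
-- def _union_box(box1: list, box2: list) -> list:
--     min_x, max_x, min_y, max_y = _bbox(box1 + box2)
--     return [
--         [min_x, min_y],
--         [max_x, min_y],
--         [max_x, max_y],
--         [min_x, max_y]
--     ]
-- ===== Notes on version B (the rewrite author's own statement) =====
-- stated objective: alternative
-- what changed: B computes the bounding rectangle by divide-and-conquer: it recursively splits the combined point list in half, takes the trivial rectangle of a single point, and merges the two halves' rectangles, instead of A's building of two coordinate lists and four separate min/max calls.
import Mathlib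
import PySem

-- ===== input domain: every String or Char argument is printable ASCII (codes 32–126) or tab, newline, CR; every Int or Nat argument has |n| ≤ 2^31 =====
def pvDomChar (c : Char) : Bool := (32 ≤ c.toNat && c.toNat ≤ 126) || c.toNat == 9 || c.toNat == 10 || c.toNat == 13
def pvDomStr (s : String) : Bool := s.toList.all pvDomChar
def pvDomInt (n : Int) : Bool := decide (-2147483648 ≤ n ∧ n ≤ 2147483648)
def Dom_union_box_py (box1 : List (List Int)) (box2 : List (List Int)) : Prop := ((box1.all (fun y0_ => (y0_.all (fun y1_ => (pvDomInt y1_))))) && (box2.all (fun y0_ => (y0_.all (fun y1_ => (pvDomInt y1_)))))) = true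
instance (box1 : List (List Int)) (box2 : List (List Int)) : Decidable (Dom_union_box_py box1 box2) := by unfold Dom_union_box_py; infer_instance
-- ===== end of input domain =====

-- B computes the bounding rectangle by divide-and-conquer over the combined point list,
-- merging the rectangles of the two halves, instead of A's two coordinate lists and four
-- min/max calls (objective: alternative).

-- ===== PORT A =====
def union_box_py (box1 : List (List Int)) (box2 : List (List Int)) : List (List Int) :=
  let all_xs := box1.map (fun p => (PySem.List.pyGet? p 0).getD 0) ++
                box2.map (fun p => (PySem.List.pyGet? p 0).getD 0)
  let all_ys := box1.map (fun p => (PySem.List.pyGet? p 1).getD 0) ++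
                box2.map (fun p => (PySem.List.pyGet? p 1).getD 0)
  let min_x := (PySem.List.min? all_xs (fun y => y)).getD 0
  let max_x := (PySem.List.max? all_xs (fun y => y)).getD 0
  let min_y := (PySem.List.min? all_ys (fun y => y)).getD 0
  let max_y := (PySem.List.max? all_ys (fun y => y)).getD 0
  [[min_x, min_y], [max_x, min_y], [max_x, max_y], [min_x, max_y]]

-- ===== PORT B =====
-- _bbox: divide-and-conquer bounding rectangle (min_x, max_x, min_y, max_y).
-- On the empty list Python B raises IndexError (pts[0]); excluded by Pre_, here getD defaults.
def bbox_alt (pts : List (List Int)) : Int × Int × Int × Int :=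
  if _h : pts.length ≤ 1 then
    let p := (PySem.List.pyGet? pts 0).getD []
    ((PySem.List.pyGet? p 0).getD 0, (PySem.List.pyGet? p 0).getD 0,
     (PySem.List.pyGet? p 1).getD 0, (PySem.List.pyGet? p 1).getD 0)
  else
    let mid := pts.length / 2
    let a := bbox_alt (pts.take mid)
    let b := bbox_alt (pts.drop mid)
    (min a.1 b.1, max a.2.1 b.2.1, min a.2.2.1 b.2.2.1, max a.2.2.2 b.2.2.2)
termination_by pts.length
decreasing_by
  · simp only [List.length_take]; omega
  · simp only [List.length_drop]; omega

def union_box_py_alt (box1 : List (List Int)) (box2 : List (List Int)) : List (List Int) :=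
  let s := bbox_alt (box1 ++ box2)
  [[s.1, s.2.2.1], [s.2.1, s.2.2.1], [s.2.1, s.2.2.2], [s.1, s.2.2.2]]

-- ===== PRECONDITION & SPEC =====
-- Pre_ excludes the inputs on which Python A raises: no points at all (min([]) → ValueError)
-- or some point with fewer than 2 coordinates (p[0]/p[1] → IndexError).
def Pre_union_box_py (box1 : List (List Int)) (box2 : List (List Int)) : Prop :=
  box1 ++ box2 ≠ [] ∧ ∀ p ∈ box1 ++ box2, 2 ≤ p.length
instance (box1 : List (List Int)) (box2 : List (List Int)) : Decidable (Pre_union_box_py box1 box2) := by unfold Pre_union_box_py; infer_instance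
def pvWitness_union_box_py : List (List Int) × List (List Int) :=
  ([[0, 1], [4, 3]], [[2, 5]])
def Spec_union_box_py (box1 : List (List Int)) (box2 : List (List Int)) (out : List (List Int)) : Prop := out = union_box_py_alt box1 box2
instance (box1 : List (List Int)) (box2 : List (List Int)) (out : List (List Int)) : Decidable (Spec_union_box_py box1 box2 out) := by unfold Spec_union_box_py; infer_instance

-- ===== CLAIM (what is proved, stated in full; the proofs are below) =====
def Claim_equal_union_box_py : Prop := ∀ (box1 : List (List Int)) (box2 : List (List Int)), Dom_union_box_py box1 box2 → Pre_union_box_py box1 box2 → Spec_union_box_py box1 box2 (union_box_py box1 box2)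

-- ===== LEMMAS AND PROOFS =====

-- the x / y coordinate of a point, as both ports read it
def fx (p : List Int) : Int := (PySem.List.pyGet? p 0).getD 0
def fy (p : List Int) : Int := (PySem.List.pyGet? p 1).getD 0

-- min / max of a nonempty Int list as Python's min()/max() compute it (0 on [])
def pmin : List Int → Int
  | [] => 0
  | x :: t => t.foldl min x
def pmax : List Int → Int
  | [] => 0
  | x :: t => t.foldl max x

theorem foldl_min_min (l : List Int) (a b : Int) :
    l.foldl min (min a b) = min a (l.foldl min b) := List.foldl_assoc
theorem foldl_max_max (l : List Int) (a b : Int) :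
    l.foldl max (max a b) = max a (l.foldl max b) := List.foldl_assoc

theorem pmin_append (l₁ l₂ : List Int) (h₁ : l₁ ≠ []) (h₂ : l₂ ≠ []) :
    pmin (l₁ ++ l₂) = min (pmin l₁) (pmin l₂) := by
  obtain ⟨a, t₁, rfl⟩ := List.exists_cons_of_ne_nil h₁
  obtain ⟨b, t₂, rfl⟩ := List.exists_cons_of_ne_nil h₂
  simp only [pmin, List.cons_append, List.foldl_append, List.foldl_cons]
  rw [foldl_min_min]

theorem pmax_append (l₁ l₂ : List Int) (h₁ : l₁ ≠ []) (h₂ : l₂ ≠ []) :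
    pmax (l₁ ++ l₂) = max (pmax l₁) (pmax l₂) := by
  obtain ⟨a, t₁, rfl⟩ := List.exists_cons_of_ne_nil h₁
  obtain ⟨b, t₂, rfl⟩ := List.exists_cons_of_ne_nil h₂
  simp only [pmax, List.cons_append, List.foldl_append, List.foldl_cons]
  rw [foldl_max_max]

-- B's divide-and-conquer rectangle equals the four coordinate extremes.
theorem bbox_alt_eq (pts : List (List Int)) (h : pts ≠ []) :
    bbox_alt pts = (pmin (pts.map fx), pmax (pts.map fx), pmin (pts.map fy), pmax (pts.map fy)) := by
  fun_induction bbox_alt pts with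
  | case1 pts hle plet =>
    obtain ⟨p, rest, rfl⟩ := List.exists_cons_of_ne_nil h
    have hrest : rest = [] := by
      simp only [List.length_cons] at hle
      exact List.eq_nil_of_length_eq_zero (by omega)
    subst hrest
    simp [plet, PySem.List.pyGet?, PySem.List.pyIdx?, pmin, pmax, fx, fy]
  | case2 pts hle mid a b iha ihb =>
    simp only [a, b, mid] at iha ihb ⊢
    have ht : pts.take (pts.length / 2) ≠ [] := by
      intro hc; have := congrArg List.length hc
      simp only [List.length_take, List.length_nil] at this; omega
    have hd : pts.drop (pts.length / 2) ≠ [] := by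
      intro hc; have := congrArg List.length hc
      simp only [List.length_drop, List.length_nil] at this; omega
    rw [iha ht, ihb hd]
    conv_rhs => rw [(List.take_append_drop (pts.length / 2) pts).symm]
    have hmapne : ∀ (f : List Int → Int) (l : List (List Int)), l ≠ [] → l.map f ≠ [] := by
      intro f l hl hc; exact hl (List.map_eq_nil_iff.mp hc)
    simp only [List.map_append,
      pmin_append _ _ (hmapne fx _ ht) (hmapne fx _ hd),
      pmax_append _ _ (hmapne fx _ ht) (hmapne fx _ hd),
      pmin_append _ _ (hmapne fy _ ht) (hmapne fy _ hd),
      pmax_append _ _ (hmapne fy _ ht) (hmapne fy _ hd)]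

-- ===== VERDICT (by name: the statement is the Claim_ definition above) =====
theorem union_box_py_spec : Claim_equal_union_box_py := by
  intro box1 box2 _ hpre
  obtain ⟨hne, _⟩ := hpre
  unfold Spec_union_box_py union_box_py union_box_py_alt
  rw [bbox_alt_eq (box1 ++ box2) hne]
  obtain ⟨first, rest, hpts⟩ := List.exists_cons_of_ne_nil hne
  have hx : box1.map (fun p => (PySem.List.pyGet? p 0).getD 0) ++
      box2.map (fun p => (PySem.List.pyGet? p 0).getD 0) = (box1 ++ box2).map fx := by
    rw [List.map_append]; rfl
  have hy : box1.map (fun p => (PySem.List.pyGet? p 1).getD 0) ++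
      box2.map (fun p => (PySem.List.pyGet? p 1).getD 0) = (box1 ++ box2).map fy := by
    rw [List.map_append]; rfl
  simp only [hx, hy, hpts, List.map_cons,
    PySem.List.min?_id_cons, PySem.List.max?_id_cons, Option.getD_some, pmin, pmax]
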